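-- pv_equiv track=rewrite | github.com/hosahn/lightweight_hdfm | infrastructure/clients/osv_client.py | _pick_best_vulnerability
-- ===== SOURCE A (Python) =====
-- from typing import Optional, Dict, List, Set
--
-- def _pick_best_vulnerability(osv_group: List[Dict]) -> Dict:
--     """Pick the best representative: CVE > GHSA > others"""
--     cve_vulns = []
--     ghsa_vulns = []
--
--     for osv_data in osv_group:
--         vuln_id = osv_data.get('id', '')
--         if vuln_id.startswith('CVE-'):
--             cve_vulns.append(osv_data)
--         elif vuln_id.startswith('GHSA-'):
--             ghsa_vulns.append(osv_data)
--
--     if cve_vulns: return cve_vulns[0]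
--     if ghsa_vulns: return ghsa_vulns[0]
--     return osv_group[0] if osv_group else None
-- ===== SOURCE B (Python) =====
-- def _pick_best_vulnerability(osv_group):
--     """Pick the best representative: CVE > GHSA > others"""
--     for prefix in ('CVE-', 'GHSA-'):
--         for osv_data in osv_group:
--             if osv_data.get('id', '').startswith(prefix):
--                 return osv_data
--     return osv_group[0] if osv_group else None
-- ===== Notes on version B (the rewrite author's own statement) =====
-- stated objective: simpler
-- what changed: Replaced the single-pass two-bucket partition (building full CVE and GHSA lists, then picking a head) by staged early-exit scans: one scan per prefix in priority order that returns the first match immediately, then the first element as fallback; no intermediate lists are built.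
import Mathlib
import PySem

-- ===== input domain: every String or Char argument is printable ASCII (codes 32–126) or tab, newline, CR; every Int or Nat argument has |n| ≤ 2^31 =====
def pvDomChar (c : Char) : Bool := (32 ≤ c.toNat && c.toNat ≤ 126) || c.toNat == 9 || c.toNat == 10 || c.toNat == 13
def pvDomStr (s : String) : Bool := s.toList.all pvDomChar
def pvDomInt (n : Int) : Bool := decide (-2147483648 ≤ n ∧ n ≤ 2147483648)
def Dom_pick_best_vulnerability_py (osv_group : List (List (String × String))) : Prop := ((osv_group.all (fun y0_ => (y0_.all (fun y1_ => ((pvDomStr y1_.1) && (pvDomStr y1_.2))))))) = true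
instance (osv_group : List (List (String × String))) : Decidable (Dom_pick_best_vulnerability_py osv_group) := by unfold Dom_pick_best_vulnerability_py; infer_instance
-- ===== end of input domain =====

-- B replaces A's single-pass two-bucket partition by staged early-exit scans, one per prefix in priority order (simpler, same cost).

-- ===== PORT A =====
-- vuln_id = osv_data.get('id', '')
def pvVulnId (osv_data : List (String × String)) : String :=
  PySem.Dict.getD (PySem.Dict.mk osv_data) "id" ""

def pick_best_vulnerability_py (osv_group : List (List (String × String))) : Option (List (String × String)) :=
  let acc := osv_group.foldl
    (fun (acc : List (List (String × String)) × List (List (String × String))) osv_data =>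
      if PySem.Str.startswith (pvVulnId osv_data) "CVE-" then (acc.1 ++ [osv_data], acc.2)
      else if PySem.Str.startswith (pvVulnId osv_data) "GHSA-" then (acc.1, acc.2 ++ [osv_data])
      else acc)
    ([], [])
  match acc.1 with
  | x :: _ => some x
  | [] =>
    match acc.2 with
    | x :: _ => some x
    | [] => match osv_group with
            | x :: _ => some x
            | [] => none

-- ===== PORT B =====
-- the inner 'for osv_data in osv_group: if ….startswith(prefix): return osv_data' scan of Source B
def pvScan (pfx : String) : List (List (String × String)) → Option (List (String × String))
  | [] => none
  | osv_data :: rest =>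
    if PySem.Str.startswith (PySem.Dict.getD (PySem.Dict.mk osv_data) "id" "") pfx
    then some osv_data else pvScan pfx rest

def pick_best_vulnerability_py_alt (osv_group : List (List (String × String))) : Option (List (String × String)) :=
  -- for prefix in ('CVE-', 'GHSA-'): early-return from the staged scans, then the fallback
  match pvScan "CVE-" osv_group with
  | some v => some v
  | none =>
    match pvScan "GHSA-" osv_group with
    | some v => some v
    | none => match osv_group with
              | x :: _ => some x
              | [] => none

-- ===== PRECONDITION & SPEC =====
def Spec_pick_best_vulnerability_py (osv_group : List (List (String × String))) (out : Option (List (String × String))) : Prop := out = pick_best_vulnerability_py_alt osv_group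
instance (osv_group : List (List (String × String))) (out : Option (List (String × String))) : Decidable (Spec_pick_best_vulnerability_py osv_group out) := by unfold Spec_pick_best_vulnerability_py; infer_instance

-- ===== CLAIM (what is proved, stated in full; the proofs are below) =====
def Claim_equal_pick_best_vulnerability_py : Prop := ∀ (osv_group : List (List (String × String))), Dom_pick_best_vulnerability_py osv_group → Spec_pick_best_vulnerability_py osv_group (pick_best_vulnerability_py osv_group)

-- ===== LEMMAS AND PROOFS =====

-- A's partition loop, solved: the two buckets are filters
lemma pvPartition_fold (c gh : List (String × String) → Bool)
    (g : List (List (String × String))) (a b : List (List (String × String))) :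
    g.foldl
      (fun (acc : List (List (String × String)) × List (List (String × String))) x =>
        if c x then (acc.1 ++ [x], acc.2)
        else if gh x then (acc.1, acc.2 ++ [x])
        else acc)
      (a, b)
    = (a ++ g.filter c, b ++ g.filter (fun v => !c v && gh v)) := by
  induction g generalizing a b with
  | nil => simp
  | cons x t ih =>
    simp only [List.foldl_cons, List.filter_cons]
    by_cases h0 : c x <;> by_cases h1 : gh x <;> simp [h0, h1, ih]

-- B's scan is the head of the corresponding filter
lemma pvScan_eq_filter_head (p : String) (g : List (List (String × String))) :
    pvScan p g = (g.filter (fun v => PySem.Str.startswith (pvVulnId v) p)).head? := by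
  induction g with
  | nil => rfl
  | cons x t ih =>
    have e : PySem.Dict.getD (PySem.Dict.mk x) "id" "" = pvVulnId x := rfl
    rw [pvScan, e, List.filter_cons]
    split_ifs with h
    · rfl
    · exact ih

-- if no element is a CVE, the (¬CVE ∧ GHSA) filter is the GHSA filter
lemma pvFilter_ghsa_of_no_cve (c gh : List (String × String) → Bool)
    (g : List (List (String × String))) (h : g.filter c = []) :
    g.filter (fun v => !c v && gh v) = g.filter gh := by
  induction g with
  | nil => rfl
  | cons x t ih =>
    simp only [List.filter_cons] at h ⊢
    by_cases hc : c x
    · simp [hc] at h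
    · simp only [hc] at h ⊢
      simp [ih h]

-- ===== VERDICT (by name: the statement is the Claim_ definition above) =====
theorem pick_best_vulnerability_py_spec : Claim_equal_pick_best_vulnerability_py := by
  intro g _
  show pick_best_vulnerability_py g = pick_best_vulnerability_py_alt g
  simp only [pick_best_vulnerability_py, pick_best_vulnerability_py_alt,
    pvPartition_fold (fun v => PySem.Str.startswith (pvVulnId v) "CVE-")
      (fun v => PySem.Str.startswith (pvVulnId v) "GHSA-") g [] [],
    pvScan_eq_filter_head, List.nil_append]
  rcases h0 : g.filter (fun v => PySem.Str.startswith (pvVulnId v) "CVE-") with _ | ⟨y, s⟩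
  · rw [pvFilter_ghsa_of_no_cve _ _ _ h0]
    rcases h1 : g.filter (fun v => PySem.Str.startswith (pvVulnId v) "GHSA-") with _ | ⟨z, r⟩
    · simp
    · simp
  · simp
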